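-- pv_equiv track=rewrite | github.com/softwareconnect/idps-ai | src-py/cnn_model_data_generator_beginner.py | exponential_decay_layers
-- ===== SOURCE A (Python) =====
-- def calculate_start_units(num_layers):
--     """
--     Calculate the start_units for the first dense layer based on the number of dense layers.
--
--     Parameters:
--     num_layers (int): The number of dense layers in the network.
--
--     Returns:
--     int: The calculated start_units.
--     """
--     if num_layers <= 5:
--         # Shallow network (1-5 layers)
--         start_units = 256
--     elif 6 <= num_layers <= 10:
--         # Moderate-depth network (6-10 layers)
--         start_units = 512
--     elif 11 <= num_layers <= 20:
--         # Deep network (11-20 layers)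
--         start_units = 32768
--     else:
--         raise ValueError("num_layers should be between 1 and 20.")
--
--     return start_units
--
-- def exponential_decay_layers(num_layers, min_units=1):
--     # Calculate the start units based on the number of layers
--     start_units = calculate_start_units(num_layers)
--
--     layers = []
--     units = start_units
--     for i in range(num_layers):
--         layers.append(units)
--         units = max(units // 2, min_units)  # Halve the units at each step, ensure it doesn't go below min_units
--     return layers
-- ===== SOURCE B (Python) =====
-- def calculate_start_units(num_layers):
--     """
--     Calculate the start_units for the first dense layer based on the number of dense layers.
--
--     Parameters:
--     num_layers (int): The number of dense layers in the network.
--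
--     Returns:
--     int: The calculated start_units.
--     """
--     if num_layers <= 5:
--         # Shallow network (1-5 layers)
--         start_units = 256
--     elif 6 <= num_layers <= 10:
--         # Moderate-depth network (6-10 layers)
--         start_units = 512
--     elif 11 <= num_layers <= 20:
--         # Deep network (11-20 layers)
--         start_units = 32768
--     else:
--         raise ValueError("num_layers should be between 1 and 20.")
--
--     return start_units
--
--
-- def exponential_decay_layers(num_layers, min_units=1):
--     # Closed form: layer i holds start_units // 2**i, clamped at min_units
--     # (the first layer always uses start_units itself).
--     start_units = calculate_start_units(num_layers)
--     return [start_units if i == 0 else max(start_units // (2 ** i), min_units)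
--             for i in range(num_layers)]
-- ===== Notes on version B (the rewrite author's own statement) =====
-- stated objective: alternative
-- what changed: Replaces the running accumulator that is clamp-and-halved each iteration with a direct comprehension computing each layer from the closed form start_units // 2**i clamped at min_units (first layer is start_units itself), eliminating the mutable `units` state.
import Mathlib
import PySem

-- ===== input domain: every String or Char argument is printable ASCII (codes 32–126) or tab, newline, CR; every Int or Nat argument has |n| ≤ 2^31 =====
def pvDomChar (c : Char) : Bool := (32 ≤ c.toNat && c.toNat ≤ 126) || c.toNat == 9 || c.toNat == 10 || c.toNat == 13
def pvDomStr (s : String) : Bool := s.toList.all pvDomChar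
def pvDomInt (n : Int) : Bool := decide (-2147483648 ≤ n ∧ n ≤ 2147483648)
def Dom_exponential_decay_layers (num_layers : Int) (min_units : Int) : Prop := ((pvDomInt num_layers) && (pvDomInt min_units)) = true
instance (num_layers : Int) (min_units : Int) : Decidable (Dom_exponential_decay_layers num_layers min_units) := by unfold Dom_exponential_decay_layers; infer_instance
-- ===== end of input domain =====

-- B builds the list by a closed-form comprehension (start_units // 2**i clamped at min_units)
-- instead of A's running clamp-and-halve accumulator; alternative decomposition, same cost.

-- ===== PORT A =====
-- calculate_start_units: 'none' marks the ValueError branch (num_layers > 20), excluded by Pre_.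
def calculate_start_units (num_layers : Int) : Option Int :=
  if num_layers ≤ 5 then some 256
  else if 6 ≤ num_layers ∧ num_layers ≤ 10 then some 512
  else if 11 ≤ num_layers ∧ num_layers ≤ 20 then some 32768
  else none

def exponential_decay_layers (num_layers : Int) (min_units : Int) : List Int :=
  match calculate_start_units num_layers with
  | none => []   -- A raises ValueError here; these inputs are outside Pre_
  | some start_units =>
    ((PySem.List.pyRange 0 num_layers 1).foldl
      (fun (st : List Int × Int) _ =>
        (st.1 ++ [st.2], max (PySem.Int.floordiv st.2 2) min_units))
      ([], start_units)).1

-- ===== PORT B =====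
def exponential_decay_layers_alt (num_layers : Int) (min_units : Int) : List Int :=
  match calculate_start_units num_layers with
  | none => []   -- same ValueError branch; outside Pre_
  | some start_units =>
    (PySem.List.pyRange 0 num_layers 1).map
      (fun i => if i = 0 then start_units
                else max (PySem.Int.floordiv start_units (2 ^ i.toNat)) min_units)

-- ===== PRECONDITION & SPEC =====
-- Pre_ excludes exactly num_layers > 20, where the Python A raises ValueError.
def Pre_exponential_decay_layers (num_layers : Int) (min_units : Int) : Prop :=
  num_layers ≤ 20
instance (num_layers : Int) (min_units : Int) : Decidable (Pre_exponential_decay_layers num_layers min_units) := by unfold Pre_exponential_decay_layers; infer_instance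

def pvWitness_exponential_decay_layers : Int × Int := (7, 30)

def Spec_exponential_decay_layers (num_layers : Int) (min_units : Int) (out : List Int) : Prop := out = exponential_decay_layers_alt num_layers min_units
instance (num_layers : Int) (min_units : Int) (out : List Int) : Decidable (Spec_exponential_decay_layers num_layers min_units out) := by unfold Spec_exponential_decay_layers; infer_instance

-- ===== CLAIM (what is proved, stated in full; the proofs are below) =====
def Claim_equal_exponential_decay_layers : Prop := ∀ (num_layers : Int) (min_units : Int), Dom_exponential_decay_layers num_layers min_units → Pre_exponential_decay_layers num_layers min_units → Spec_exponential_decay_layers num_layers min_units (exponential_decay_layers num_layers min_units)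

-- ===== LEMMAS AND PROOFS =====

-- one clamp-and-halve step matches the closed form, for nonnegative s
lemma pv_halve_step (s m : Int) (hs : 0 ≤ s) (k : Nat) :
    max ((max (s / 2 ^ k) m) / 2) m = max (s / 2 ^ (k + 1)) m := by
  have ha : 0 ≤ s / 2 ^ k := Int.ediv_nonneg hs (by positivity)
  have h2 : s / 2 ^ (k + 1) = (s / 2 ^ k) / 2 := by
    rw [pow_succ, ← Int.ediv_ediv_of_nonneg (by positivity)]
  generalize s / 2 ^ k = a at *
  rw [h2]; omega

-- loop invariant: A's fold (which ignores the range elements) over any N-element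
-- list produces B's closed-form prefix, with the accumulator at the step-N value
lemma pv_loop_inv (s m : Int) (hs : 0 ≤ s) (L : List Int) :
    (List.foldl
      (fun (st : List Int × Int) (_ : Int) =>
        (st.1 ++ [st.2], max (st.2 / 2) m))
      ([], s) L) =
    ((List.range L.length).map (fun k => if k = 0 then s else max (s / 2 ^ k) m),
      if L.length = 0 then s else max (s / 2 ^ L.length) m) := by
  induction L using List.reverseRecOn with
  | nil => simp
  | append_singleton l a ih =>
    rw [List.foldl_append, ih]
    simp only [List.foldl, List.length_append, List.length_cons, List.length_nil,
      List.range_succ, List.map_append]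
    cases hl : l.length with
    | zero => simp
    | succ p =>
      simp only [Nat.succ_ne_zero, if_false]
      simp [pv_halve_step s m hs (p + 1)]

-- ===== VERDICT =====
theorem exponential_decay_layers_spec : Claim_equal_exponential_decay_layers := by
  intro n m _ hpre
  unfold Spec_exponential_decay_layers exponential_decay_layers exponential_decay_layers_alt
  cases hcs : calculate_start_units n with
  | none => rfl
  | some s =>
    have hs : 0 ≤ s := by
      unfold calculate_start_units at hcs
      split_ifs at hcs <;> simp_all <;> omega
    simp only []
    have hstep : (fun (st : List Int × Int) (_ : Int) =>
        (st.1 ++ [st.2], max (PySem.Int.floordiv st.2 2) m)) =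
        (fun (st : List Int × Int) (_ : Int) => (st.1 ++ [st.2], max (st.2 / 2) m)) := by
      funext st i
      rw [PySem.Int.floordiv_eq_ediv_of_pos (by norm_num)]
    rw [hstep, pv_loop_inv s m hs]
    rw [PySem.List.length_pyRange_one, PySem.List.pyRange_one, List.map_map]
    apply List.map_congr_left
    intro k _
    simp only [Function.comp_apply, zero_add]
    by_cases hk : k = 0
    · simp [hk]
    · have hkz : ((k : Int)) ≠ 0 := by exact_mod_cast hk
      rw [if_neg hk, if_neg hkz, PySem.Int.floordiv_eq_ediv_of_pos (by positivity),
        Int.toNat_natCast]
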